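-- pv_equiv track=rewrite | github.com/anuranjani23/deep-learning-project | contributions/2_contribution/scripts/test_coco_prompt_engineering.py | extract_noun_label
-- ===== SOURCE A (Python) =====
-- STOPWORDS = {
--     "a", "an", "the", "of", "on", "in", "with", "and", "to", "for", "by", "from",
--     "is", "are", "was", "were", "this", "that", "these", "those", "at", "as",
-- }
--
-- def extract_noun_label(caption: str) -> str:
--     # Very lightweight heuristic: pick the last non-stopword token.
--     tokens = []
--     word = ""
--     for ch in caption.lower():
--         if ch.isalnum() or ch == "-":
--             word += ch
--         else:
--             if word:
--                 tokens.append(word)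
--                 word = ""
--     if word:
--         tokens.append(word)
--     tokens = [t for t in tokens if t not in STOPWORDS]
--     return tokens[-1] if tokens else caption
-- ===== SOURCE B (Python) =====
-- STOPWORDS = {
--     "a", "an", "the", "of", "on", "in", "with", "and", "to", "for", "by", "from",
--     "is", "are", "was", "were", "this", "that", "these", "those", "at", "as",
-- }
--
-- def extract_noun_label(caption: str) -> str:
--     # Backward scan with early exit: walk the lowered caption from the END,
--     # collecting the current token's chars (in reverse scan order) in a buffer;
--     # the first completed token that is not a stopword is returned immediately.
--     # Falls back to the original caption if no such token exists.
--     s = caption.lower()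
--     buf = []
--     for ch in reversed(s):
--         if ch.isalnum() or ch == "-":
--             buf.append(ch)
--         elif buf:
--             word = "".join(reversed(buf))
--             if word not in STOPWORDS:
--                 return word
--             buf = []
--     if buf:
--         word = "".join(reversed(buf))
--         if word not in STOPWORDS:
--             return word
--     return caption
-- ===== Notes on version B (the rewrite author's own statement) =====
-- stated objective: alternative
-- what changed: Replaces A's forward pass that builds the full token list, filters out stopwords and indexes the last element with a backward scan over the reversed lowered caption that builds each token by prepending and returns early at the first completed non-stopword token.
import Mathlib
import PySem

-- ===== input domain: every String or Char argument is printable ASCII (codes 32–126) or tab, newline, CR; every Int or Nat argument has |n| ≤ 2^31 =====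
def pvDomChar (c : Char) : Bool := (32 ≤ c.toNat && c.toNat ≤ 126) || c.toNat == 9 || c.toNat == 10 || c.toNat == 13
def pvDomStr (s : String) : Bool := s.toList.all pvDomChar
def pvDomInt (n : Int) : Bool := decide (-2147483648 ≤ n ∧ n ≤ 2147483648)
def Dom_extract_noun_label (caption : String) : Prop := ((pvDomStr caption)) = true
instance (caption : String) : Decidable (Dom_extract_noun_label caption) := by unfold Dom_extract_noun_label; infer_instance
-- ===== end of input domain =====

-- B replaces A's forward build-token-list / filter / index-last by a BACKWARD scan of the
-- lowered caption that returns the first completed non-stopword token it meets (early exit).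


-- module-level constant STOPWORDS (a Python set of distinct strings)
def pvStopwords : PySem.Set String := PySem.Set.ofList
  ["a", "an", "the", "of", "on", "in", "with", "and", "to", "for", "by", "from",
   "is", "are", "was", "were", "this", "that", "these", "those", "at", "as"]

-- the tokenizer's character class: ch.isalnum() or ch == '-'
def pvClass (c : Char) : Bool := PySem.Chars.isalnum c || c == '-'

-- ===== PORT A =====
-- loop body of A: state = (tokens, word)
def pvStepA (st : List String × String) (ch : Char) : List String × String :=
  if pvClass ch then (st.1, st.2.push ch)
  else if st.2 ≠ "" then (st.1 ++ [st.2], "") else st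

def extract_noun_label (caption : String) : String :=
  let st := (PySem.Str.lower caption).toList.foldl pvStepA ([], "")
  let tokens := if st.2 ≠ "" then st.1 ++ [st.2] else st.1
  let tokens := tokens.filter (fun t => !(pvStopwords.contains t))
  if tokens ≠ [] then (PySem.List.pyGet? tokens (-1)).getD caption else caption

-- ===== PORT B =====
-- B's loop over reversed(s): buf.append(ch) is buf ++ [c]; ''.join(reversed(buf)) is
-- String.ofList buf.reverse; `return word` inside the loop becomes `some …`, and the two
-- trailing returns become the final match in the wrapper.
def pvScanB : List Char → List Char → Option String
  | [], buf =>
      if buf ≠ [] && !(pvStopwords.contains (String.ofList buf.reverse)) then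
        some (String.ofList buf.reverse) else none
  | c :: rest, buf =>
      if pvClass c then pvScanB rest (buf ++ [c])
      else if buf ≠ [] then
        (if !(pvStopwords.contains (String.ofList buf.reverse)) then
          some (String.ofList buf.reverse)
         else pvScanB rest [])
      else pvScanB rest []

def extract_noun_label_alt (caption : String) : String :=
  match pvScanB (PySem.Str.lower caption).toList.reverse [] with
  | some w => w
  | none => caption

-- ===== PRECONDITION & SPEC =====
def Spec_extract_noun_label (caption : String) (out : String) : Prop := out = extract_noun_label_alt caption
instance (caption : String) (out : String) : Decidable (Spec_extract_noun_label caption out) := by unfold Spec_extract_noun_label; infer_instance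

-- ===== CLAIM (what is proved, stated in full; the proofs are below) =====
def Claim_equal_extract_noun_label : Prop := ∀ (caption : String), Dom_extract_noun_label caption → Spec_extract_noun_label caption (extract_noun_label caption)

-- ===== LEMMAS AND PROOFS =====

-- A's tokenizer, as a function of a char list
def pvTokens (cs : List Char) : List String :=
  let st := cs.foldl pvStepA ([], "")
  if st.2 ≠ "" then st.1 ++ [st.2] else st.1

-- folding pvStepA over all-class chars only grows the word
theorem pvFold_class (l : List Char) (hl : ∀ c ∈ l, pvClass c = true) (ts : List String) (u : String) :
    l.foldl pvStepA (ts, u) = (ts, u ++ String.ofList l) := by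
  induction l generalizing u with
  | nil => simp
  | cons c t ih =>
    have hc := hl c (by simp)
    have ht : ∀ c ∈ t, pvClass c = true := fun x hx => hl x (by simp [hx])
    simp only [List.foldl_cons, pvStepA, hc, if_true, ih ht]
    exact congrArg _ (by apply String.ext; simp)

-- appending a non-class char leaves the token list unchanged and empties the word
theorem pvTok_nonclass (xs : List Char) (c : Char) (hc : pvClass c = false) :
    (xs ++ [c]).foldl pvStepA ([], "") = (pvTokens xs, "") := by
  rw [List.foldl_append]
  rcases h : xs.foldl pvStepA ([], "") with ⟨ts, u⟩
  by_cases hu : u = ""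
  · simp [pvStepA, hc, hu, pvTokens, h]
  · simp [pvStepA, hc, hu, pvTokens, h]

-- tokens of (xs ++ [c] ++ w) for non-class c and all-class w
theorem pvTok_split (xs : List Char) (c : Char) (hc : pvClass c = false)
    (w : List Char) (hw : ∀ x ∈ w, pvClass x = true) :
    pvTokens (xs ++ [c] ++ w) = pvTokens xs ++ (if w = [] then [] else [String.ofList w]) := by
  unfold pvTokens
  rw [List.foldl_append, pvTok_nonclass xs c hc, pvFold_class w hw]
  by_cases hwe : w = []
  · simp [hwe, pvTokens]
  · simp [hwe, pvTokens]

-- tokens of an all-class list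
theorem pvTok_class (w : List Char) (hw : ∀ x ∈ w, pvClass x = true) :
    pvTokens w = if w = [] then [] else [String.ofList w] := by
  unfold pvTokens
  rw [show w = [] ++ w by simp, List.foldl_append, pvFold_class w hw]
  by_cases hwe : w = []
  · simp [hwe]
  · simp [hwe]

-- last of the filtered list after flushing a non-stopword / a stopword
theorem pvFlush_keep (ts : List String) (w : String) (hc : w ∉ pvStopwords) :
    ((ts ++ [w]).filter (fun t => !(pvStopwords.contains t))).getLast? = some w := by
  simp [List.filter_append, List.filter, hc]

theorem pvFlush_drop (ts : List String) (w : String) (hc : w ∈ pvStopwords) :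
    ((ts ++ [w]).filter (fun t => !(pvStopwords.contains t))).getLast?
      = (ts.filter (fun t => !(pvStopwords.contains t))).getLast? := by
  simp [List.filter_append, List.filter, hc]

-- B's scan with the buffer kept in word order (proof-side reformulation of pvScanB)
def pvScanRev : List Char → List Char → Option String
  | [], w =>
      if w ≠ [] && !(pvStopwords.contains (String.ofList w)) then some (String.ofList w) else none
  | c :: rest, w =>
      if pvClass c then pvScanRev rest (c :: w)
      else if w ≠ [] then
        (if !(pvStopwords.contains (String.ofList w)) then some (String.ofList w)
         else pvScanRev rest [])
      else pvScanRev rest []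

-- pvScanB carries the buffer reversed
theorem pvScanB_eq_rev (cs : List Char) : ∀ buf : List Char, pvScanB cs buf = pvScanRev cs buf.reverse := by
  induction cs with
  | nil =>
    intro buf
    simp [pvScanB, pvScanRev]
  | cons c rest ih =>
    intro buf
    by_cases hc : pvClass c = true
    · simp [pvScanB, pvScanRev, hc, ih (buf ++ [c])]
    · by_cases hb : buf = []
      · simp [pvScanB, pvScanRev, hc, hb, show ([] : List Char).reverse = [] from rfl, ih []]
      · have hb' : buf.reverse ≠ [] := by simp [hb]
        simp [pvScanB, pvScanRev, hc, hb, hb', ih []]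

-- main invariant of the backward scan
theorem pvScanRev_spec (cs w : List Char) (hw : ∀ x ∈ w, pvClass x = true) :
    pvScanRev cs w
      = ((pvTokens (cs.reverse ++ w)).filter (fun t => !(pvStopwords.contains t))).getLast? := by
  induction cs generalizing w with
  | nil =>
    rw [List.reverse_nil, List.nil_append, pvTok_class w hw]
    by_cases hwe : w = []
    · simp [pvScanRev, hwe]
    · by_cases hs : String.ofList w ∈ pvStopwords
      · rw [if_neg hwe, ← List.nil_append [String.ofList w], pvFlush_drop [] (String.ofList w) hs]
        simp [pvScanRev, hwe, hs]
      · rw [if_neg hwe, ← List.nil_append [String.ofList w], pvFlush_keep [] (String.ofList w) hs]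
        simp [pvScanRev, hwe, hs]
  | cons c cs ih =>
    by_cases hc : pvClass c = true
    · have harr : (c :: cs).reverse ++ w = cs.reverse ++ (c :: w) := by simp
      rw [harr, ← ih (c :: w) ?_]
      · simp [pvScanRev, hc]
      · intro x hx
        rw [List.mem_cons] at hx
        rcases hx with h | h
        · simpa [h] using hc
        · exact hw x h
    · have harr : (c :: cs).reverse ++ w = cs.reverse ++ [c] ++ w := by simp
      rw [harr, pvTok_split cs.reverse c (by simpa using hc) w hw]
      have ih0 := ih [] (by intro x hx; simp at hx)
      rw [List.append_nil] at ih0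
      by_cases hwe : w = []
      · simp [pvScanRev, hc, hwe, ih0]
      · by_cases hs : String.ofList w ∈ pvStopwords
        · rw [if_neg hwe, pvFlush_drop _ _ hs]
          simp [pvScanRev, hc, hwe, hs, ih0]
        · rw [if_neg hwe, pvFlush_keep _ _ hs]
          simp [pvScanRev, hc, hwe, hs]

-- tokens[-1] if tokens else caption, through getLast?
theorem pvLast_lemma (caption : String) (l : List String) :
    (if l ≠ [] then (PySem.List.pyGet? l (-1)).getD caption else caption)
      = (l.getLast?).getD caption := by
  cases l with
  | nil => simp
  | cons a t => simp [PySem.List.pyGet?_neg_one]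

-- ===== VERDICT (by name: the statement is the Claim_ definition above) =====
theorem extract_noun_label_spec : Claim_equal_extract_noun_label := by
  intro caption _
  unfold Spec_extract_noun_label extract_noun_label extract_noun_label_alt
  rw [pvScanB_eq_rev, show ([] : List Char).reverse = [] from rfl,
    pvScanRev_spec _ [] (by intro x hx; simp at hx)]
  simp only [List.append_nil, List.reverse_reverse]
  have h := pvLast_lemma caption
    ((pvTokens (PySem.Str.lower caption).toList).filter (fun t => !(pvStopwords.contains t)))
  simp only [pvTokens] at h ⊢
  rw [h]
  cases ((if ((PySem.Str.lower caption).toList.foldl pvStepA ([], "")).2 ≠ "" then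
        ((PySem.Str.lower caption).toList.foldl pvStepA ([], "")).1 ++
          [((PySem.Str.lower caption).toList.foldl pvStepA ([], "")).2]
      else ((PySem.Str.lower caption).toList.foldl pvStepA ([], "")).1).filter
      (fun t => !(pvStopwords.contains t))).getLast? with
  | none => rfl
  | some w => rfl
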